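-- pv_equiv track=rewrite | github.com/suixin233/OJ | duduxiong_backhome.py | backhome
-- ===== SOURCE A (Python) =====
-- import copy
--
-- def backhome(n, line):
--     minL = 0
--     for i in range(1,n-1):
--         tmp = copy.copy(line)
--         del tmp[i]
--         length = distance_count(tmp)
--         if i == 1:
--             minL = length
--         else:
--             minL = min(length, minL)
--     return minL
--
-- def distance_count(path):
--     n = len(path)
--     count = 0
--     for i in range(n-1):
--         count = count + abs(path[i] - path[i+1])
--     return count
-- ===== SOURCE B (Python) =====
-- def backhome(n, line):
--     total = sum(abs(line[j] - line[j + 1]) for j in range(len(line) - 1))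
--     minL = 0
--     for i in range(1, n - 1):
--         if i == len(line) - 1:
--             cand = total - abs(line[i - 1] - line[i])
--         else:
--             cand = (total - abs(line[i - 1] - line[i])
--                     - abs(line[i] - line[i + 1])
--                     + abs(line[i - 1] - line[i + 1]))
--         minL = cand if i == 1 else min(cand, minL)
--     return minL
-- ===== Notes on version B (the rewrite author's own statement) =====
-- stated objective: faster
-- what changed: Instead of copying the list and re-summing all segment lengths for each removed point, B computes the total path length once and adjusts it in O(1) per removed point using only the two adjacent segments.
import Mathlib
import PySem

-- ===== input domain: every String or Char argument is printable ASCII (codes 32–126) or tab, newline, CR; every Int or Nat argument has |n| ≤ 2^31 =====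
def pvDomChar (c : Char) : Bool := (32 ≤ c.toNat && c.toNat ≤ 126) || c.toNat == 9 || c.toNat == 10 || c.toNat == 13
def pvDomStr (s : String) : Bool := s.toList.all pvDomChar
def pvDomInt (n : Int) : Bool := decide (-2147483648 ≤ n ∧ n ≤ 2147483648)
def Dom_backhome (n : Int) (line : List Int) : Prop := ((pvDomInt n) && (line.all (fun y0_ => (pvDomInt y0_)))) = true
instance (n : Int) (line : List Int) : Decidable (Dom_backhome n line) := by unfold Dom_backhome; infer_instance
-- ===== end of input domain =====

-- B replaces A's per-point list copy + full re-summation by one precomputed total adjusted in O(1) per removed point (objective: faster).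

-- ===== PORT A =====
def distance_count (path : List Int) : Int :=
  (PySem.List.pyRange 0 ((path.length : Int) - 1) 1).foldl
    (fun count i => count + |PySem.List.pyGetD path i 0 - PySem.List.pyGetD path (i + 1) 0|) 0

def backhome (n : Int) (line : List Int) : Int :=
  (PySem.List.pyRange 1 (n - 1) 1).foldl
    (fun minL i =>
      match PySem.List.pop? line i with
      | some (_, tmp) =>
          let length := distance_count tmp
          if i == 1 then length else min length minL
      | none => minL)   -- 'del tmp[i]' raises IndexError here; excluded by Pre_
    0

-- ===== PORT B =====
def backhome_alt (n : Int) (line : List Int) : Int :=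
  let total := ((PySem.List.pyRange 0 ((line.length : Int) - 1) 1).map
      (fun j => |PySem.List.pyGetD line j 0 - PySem.List.pyGetD line (j + 1) 0|)).sum
  (PySem.List.pyRange 1 (n - 1) 1).foldl
    (fun minL i =>
      let cand :=
        if i == (line.length : Int) - 1 then
          total - |PySem.List.pyGetD line (i - 1) 0 - PySem.List.pyGetD line i 0|
        else
          total - |PySem.List.pyGetD line (i - 1) 0 - PySem.List.pyGetD line i 0|
                - |PySem.List.pyGetD line i 0 - PySem.List.pyGetD line (i + 1) 0|
                + |PySem.List.pyGetD line (i - 1) 0 - PySem.List.pyGetD line (i + 1) 0|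
      if i == 1 then cand else min cand minL)
    0

-- ===== PRECONDITION & SPEC =====
-- Pre_ excludes exactly the inputs where A raises IndexError: when 3 ≤ n the loop
-- deletes indices up to n-2, which requires n ≤ len(line)+1.
def Pre_backhome (n : Int) (line : List Int) : Prop := 3 ≤ n → n ≤ (line.length : Int) + 1
instance (n : Int) (line : List Int) : Decidable (Pre_backhome n line) := by unfold Pre_backhome; infer_instance
def pvWitness_backhome : Int × List Int := (4, [1, 5, 2, 4])

def Spec_backhome (n : Int) (line : List Int) (out : Int) : Prop := out = backhome_alt n line
instance (n : Int) (line : List Int) (out : Int) : Decidable (Spec_backhome n line out) := by unfold Spec_backhome; infer_instance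

-- ===== CLAIM (what is proved, stated in full; the proofs are below) =====
def Claim_equal_backhome : Prop := ∀ (n : Int) (line : List Int), Dom_backhome n line → Pre_backhome n line → Spec_backhome n line (backhome n line)

-- ===== LEMMAS AND PROOFS =====

-- structural form of the pairwise-distance sum
def pdist : List Int → Int
  | a :: b :: t => |a - b| + pdist (b :: t)
  | _ => 0

-- indexed partial sum of adjacent distances
def sumIdx (l : List Int) : Nat → Int
  | 0 => 0
  | m + 1 => sumIdx l m + |l.getD m 0 - l.getD (m + 1) 0|

theorem foldl_sumIdx (l : List Int) (m : Nat) : ∀ (init : Int),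
    (PySem.List.pyRange 0 (m : Int) 1).foldl
      (fun c i => c + |PySem.List.pyGetD l i 0 - PySem.List.pyGetD l (i + 1) 0|) init
    = init + sumIdx l m := by
  induction m with
  | zero => intro init; simp [PySem.List.pyRange_one_eq_nil, sumIdx]
  | succ m ih =>
      intro init
      rw [show (PySem.List.pyRange 0 ((m + 1 : Nat) : Int) 1)
            = PySem.List.pyRange 0 (m : Int) 1 ++ [(m : Int)] by
        rw [show ((m + 1 : Nat) : Int) = (m : Int) + 1 by push_cast; ring]
        exact PySem.List.pyRange_one_succ_right (by positivity)]
      rw [List.foldl_append, ih]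
      simp only [List.foldl_cons, List.foldl_nil, sumIdx]
      rw [show ((m : Int) + 1) = ((m + 1 : Nat) : Int) by push_cast; ring]
      rw [PySem.List.pyGetD_natCast, PySem.List.pyGetD_natCast]
      ring

theorem sumIdx_cons (a : Int) (l : List Int) (m : Nat) :
    sumIdx (a :: l) (m + 1) = |a - l.getD 0 0| + sumIdx l m := by
  induction m with
  | zero => simp [sumIdx]
  | succ m ih =>
      show sumIdx (a :: l) (m + 1) + |(a :: l).getD (m + 1) 0 - (a :: l).getD (m + 2) 0| = _
      rw [ih]
      show _ = |a - l.getD 0 0| + (sumIdx l m + |l.getD m 0 - l.getD (m + 1) 0|)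
      simp only [List.getD_cons_succ]
      ring

theorem sumIdx_eq_pdist (l : List Int) : sumIdx l (l.length - 1) = pdist l := by
  induction l with
  | nil => simp [sumIdx, pdist]
  | cons a t ih =>
      cases t with
      | nil => simp [sumIdx, pdist]
      | cons b t' =>
          have h : (a :: b :: t').length - 1 = ((b :: t').length - 1) + 1 := by
            simp
          rw [h, sumIdx_cons]
          rw [ih]
          simp [pdist]

theorem distance_count_eq_pdist (path : List Int) : distance_count path = pdist path := by
  unfold distance_count
  cases path with
  | nil => simp [PySem.List.pyRange_one_eq_nil, pdist]
  | cons a t =>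
      rw [show ((a :: t).length : Int) - 1 = ((a :: t).length - 1 : Nat) by simp]
      rw [foldl_sumIdx, sumIdx_eq_pdist]
      ring

theorem pdist_erase (line : List Int) : ∀ (k : Nat), 1 ≤ k → k < line.length →
    pdist (line.eraseIdx k) = if k = line.length - 1
      then pdist line - |line.getD (k - 1) 0 - line.getD k 0|
      else pdist line - |line.getD (k - 1) 0 - line.getD k 0|
            - |line.getD k 0 - line.getD (k + 1) 0|
            + |line.getD (k - 1) 0 - line.getD (k + 1) 0| := by
  induction line with
  | nil => intro k _ h2; simp at h2
  | cons a rest ih =>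
      intro k h1 h2
      obtain ⟨j, rfl⟩ : ∃ j, k = j + 1 := ⟨k - 1, by omega⟩
      cases j with
      | zero =>
          cases rest with
          | nil => simp at h2
          | cons b t =>
              cases t with
              | nil =>
                  simp [List.eraseIdx, pdist]
              | cons c t' =>
                  have hcond : ¬ ((0:Nat) + 1 = (a :: b :: c :: t').length - 1) := by
                    simp
                  rw [if_neg hcond]
                  show pdist (a :: c :: t') = _
                  show |a - c| + pdist (c :: t') = _
                  show _ = (|a - b| + (|b - c| + pdist (c :: t')))
                    - |(a :: b :: c :: t').getD 0 0 - (a :: b :: c :: t').getD 1 0|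
                    - |(a :: b :: c :: t').getD 1 0 - (a :: b :: c :: t').getD 2 0|
                    + |(a :: b :: c :: t').getD 0 0 - (a :: b :: c :: t').getD 2 0|
                  simp only [List.getD_cons_succ, List.getD_cons_zero]
                  ring
      | succ j' =>
          cases rest with
          | nil => simp at h2
          | cons b t =>
              have hlen : j' + 1 < (b :: t).length := by
                simp at h2 ⊢; omega
              have ihr := ih (j' + 1) (by omega) hlen
              show pdist (a :: ((b :: t).eraseIdx (j' + 1))) = _
              show pdist (a :: b :: t.eraseIdx j') = _
              have step : pdist (a :: b :: t.eraseIdx j') = |a - b| + pdist ((b :: t).eraseIdx (j' + 1)) := rfl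
              rw [step, ihr]
              have hiff : (j' + 1 = (b :: t).length - 1) ↔ (j' + 1 + 1 = (a :: b :: t).length - 1) := by
                simp
              by_cases hc : j' + 1 + 1 = (a :: b :: t).length - 1
              · rw [if_pos hc, if_pos (hiff.mpr hc)]
                show |a - b| + (pdist (b :: t) - _) = (|a - b| + pdist (b :: t)) - _
                simp only [List.getD_cons_succ, Nat.add_sub_cancel]
                ring
              · rw [if_neg hc, if_neg (fun h => hc (hiff.mp h))]
                show |a - b| + (pdist (b :: t) - _ - _ + _) = (|a - b| + pdist (b :: t)) - _ - _ + _
                simp only [List.getD_cons_succ, Nat.add_sub_cancel]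
                ring

-- ===== VERDICT (by name: the statement is the Claim_ definition above) =====
theorem total_eq_pdist (line : List Int) :
    ((PySem.List.pyRange 0 ((line.length : Int) - 1) 1).map
      (fun j => |PySem.List.pyGetD line j 0 - PySem.List.pyGetD line (j + 1) 0|)).sum = pdist line := by
  have h := distance_count_eq_pdist line
  unfold distance_count at h
  rw [List.sum_eq_foldl, List.foldl_map]
  exact h

theorem backhome_spec : Claim_equal_backhome := by
  intro n line _ hpre
  unfold Spec_backhome backhome backhome_alt
  simp only [total_eq_pdist]
  apply PySem.List.foldl_congr_mem
  intro acc i hi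
  rw [PySem.List.mem_pyRange_one] at hi
  have hn : 3 ≤ n := by omega
  have hle : n ≤ (line.length : Int) + 1 := hpre hn
  obtain ⟨k, rfl⟩ : ∃ k : Nat, i = (k : Int) :=
    ⟨i.toNat, (Int.toNat_of_nonneg (by omega)).symm⟩
  have hk1 : 1 ≤ k := by omega
  have hk2 : k < line.length := by omega
  rw [PySem.List.pop?_natCast line k hk2]
  simp only
  rw [distance_count_eq_pdist, pdist_erase line k hk1 hk2]
  have em1 : ((k : Int) - 1) = ((k - 1 : Nat) : Int) := by omega
  have ep1 : ((k : Int) + 1) = ((k + 1 : Nat) : Int) := by omega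
  rw [em1, ep1, PySem.List.pyGetD_natCast, PySem.List.pyGetD_natCast,
      PySem.List.pyGetD_natCast]
  have hcond : ((k : Int) == (line.length : Int) - 1) = decide (k = line.length - 1) := by
    by_cases hc : k = line.length - 1
    · simp [hc]; omega
    · simp [hc]
      intro h
      exact absurd (by omega : k = line.length - 1) hc
  rw [hcond]
  by_cases hc : k = line.length - 1
  · simp [hc]
  · simp [hc]
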